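-- pv_equiv track=rewrite | github.com/Sketch98/aion | aion/cores/structural_decorators/_tree.py | _balanced_tree_indexer
-- ===== SOURCE A (Python) =====
-- def _balanced_tree_indexer(num_leaves, num_branches):
--     """Makes num_branches buckets and fills the buckets as evenly as possible
--     with num_leaves
--     leaves then returns a set of start and end indices for slicing the list
--     of leaves. """
--     floor = num_leaves // num_branches
--     widths = [floor] * num_branches
--     for i in range(num_leaves % num_branches):
--         widths[i] += 1
--     branch_indices = []
--     cur_index = 0
--     for i in range(num_branches):
--         branch_indices.append((cur_index, cur_index + widths[i]))
--         cur_index += widths[i]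
--     return branch_indices
-- ===== SOURCE B (Python) =====
-- def _balanced_tree_indexer(num_leaves, num_branches):
--     """Makes num_branches buckets and fills the buckets as evenly as possible
--     with num_leaves leaves then returns a set of start and end indices for
--     slicing the list of leaves."""
--     floor = num_leaves // num_branches
--     rem = num_leaves % num_branches
--
--     def start(i):
--         return i * floor + min(i, rem)
--
--     return [(start(i), start(i + 1)) for i in range(num_branches)]
-- ===== Notes on version B (the rewrite author's own statement) =====
-- stated objective: simpler
-- what changed: Replaces the widths list and the running cur_index prefix-sum accumulator with a single comprehension computing each bucket's boundaries independently by the closed form start(i) = i*floor + min(i, rem).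
import Mathlib
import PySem

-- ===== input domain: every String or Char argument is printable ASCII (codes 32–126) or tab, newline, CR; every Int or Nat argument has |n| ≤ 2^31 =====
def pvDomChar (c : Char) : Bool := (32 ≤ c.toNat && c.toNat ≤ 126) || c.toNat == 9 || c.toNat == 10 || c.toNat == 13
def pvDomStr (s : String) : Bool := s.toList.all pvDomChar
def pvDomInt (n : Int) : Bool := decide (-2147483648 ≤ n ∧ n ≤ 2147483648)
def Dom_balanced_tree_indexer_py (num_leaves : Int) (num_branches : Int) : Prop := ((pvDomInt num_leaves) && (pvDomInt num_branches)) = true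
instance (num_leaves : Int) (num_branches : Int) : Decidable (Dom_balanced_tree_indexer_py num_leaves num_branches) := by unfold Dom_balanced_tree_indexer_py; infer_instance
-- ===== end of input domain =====

-- B replaces A's widths array and running prefix-sum accumulator with a closed form
-- start(i) = i*floor + min(i, rem) computed independently per bucket (objective: simpler).

-- ===== PORT A =====
-- Literal transliteration of A. widths[i] += 1 is ported with List.set/List.getD at
-- i.toNat: exact, because in the loop 0 ≤ i < num_leaves % num_branches ≤ len(widths),
-- so the Python index is nonnegative and in range (no IndexError inside Pre_).
def balanced_tree_indexer_py (num_leaves : Int) (num_branches : Int) : List (Int × Int) :=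
  let floor := PySem.Int.floordiv num_leaves num_branches
  let widths0 := List.replicate num_branches.toNat floor
  let widths := (PySem.List.pyRange 0 (PySem.Int.mod num_leaves num_branches) 1).foldl
      (fun w i => w.set i.toNat (w.getD i.toNat 0 + 1)) widths0
  let res := (PySem.List.pyRange 0 num_branches 1).foldl
      (fun (st : List (Int × Int) × Int) i =>
        let wi := widths.getD i.toNat 0   -- widths[i]; in range, exact (see above)
        (st.1 ++ [(st.2, st.2 + wi)], st.2 + wi)) ([], 0)
  res.1

-- ===== PORT B =====
def balanced_tree_indexer_py_alt (num_leaves : Int) (num_branches : Int) : List (Int × Int) :=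
  let floor := PySem.Int.floordiv num_leaves num_branches
  let rem := PySem.Int.mod num_leaves num_branches
  let start := fun (i : Int) => i * floor + min i rem
  (PySem.List.pyRange 0 num_branches 1).map (fun i => (start i, start (i + 1)))

-- ===== PRECONDITION & SPEC =====
-- num_branches = 0 makes '//' raise ZeroDivisionError in A (and in B).
def Pre_balanced_tree_indexer_py (num_leaves : Int) (num_branches : Int) : Prop :=
  num_branches ≠ 0
instance (num_leaves : Int) (num_branches : Int) : Decidable (Pre_balanced_tree_indexer_py num_leaves num_branches) := by unfold Pre_balanced_tree_indexer_py; infer_instance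
def pvWitness_balanced_tree_indexer_py : Int × Int := (10, 3)

def Spec_balanced_tree_indexer_py (num_leaves : Int) (num_branches : Int) (out : List (Int × Int)) : Prop := out = balanced_tree_indexer_py_alt num_leaves num_branches
instance (num_leaves : Int) (num_branches : Int) (out : List (Int × Int)) : Decidable (Spec_balanced_tree_indexer_py num_leaves num_branches out) := by unfold Spec_balanced_tree_indexer_py; infer_instance

-- ===== CLAIM (what is proved, stated in full; the proofs are below) =====
def Claim_equal_balanced_tree_indexer_py : Prop := ∀ (num_leaves : Int) (num_branches : Int), Dom_balanced_tree_indexer_py num_leaves num_branches → Pre_balanced_tree_indexer_py num_leaves num_branches → Spec_balanced_tree_indexer_py num_leaves num_branches (balanced_tree_indexer_py num_leaves num_branches)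

-- ===== LEMMAS AND PROOFS =====

-- the set/increment fold preserves length
lemma pv_foldl_set_length (l : List Int) :
    ∀ (w : List Int),
      (l.foldl (fun w i => w.set i.toNat (w.getD i.toNat 0 + 1)) w).length = w.length := by
  induction l with
  | nil => intro w; rfl
  | cons i t ih => intro w; rw [List.foldl_cons, ih, List.length_set]

-- elementwise value of the widths after the increment loop
lemma pv_widths_getD (r : Int) (hr : 0 ≤ r) :
    ∀ (w : List Int) (k : Nat),
      ((PySem.List.pyRange 0 r 1).foldl
          (fun w i => w.set i.toNat (w.getD i.toNat 0 + 1)) w).getD k 0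
        = w.getD k 0 + (if (k : Int) < r ∧ k < w.length then 1 else 0) := by
  induction r, hr using Int.le_induction with
  | base =>
    intro w k
    simp [PySem.List.pyRange_one_eq_nil (by omega : (0:Int) ≤ 0)]
  | succ r hr ih =>
    intro w k
    rw [PySem.List.pyRange_one_succ_right (by omega), List.foldl_append]
    simp only [List.foldl]
    set u := (PySem.List.pyRange 0 r 1).foldl
        (fun w i => w.set i.toNat (w.getD i.toNat 0 + 1)) w with hu
    have hlen : u.length = w.length := pv_foldl_set_length _ w
    by_cases hk : k = r.toNat ∧ k < w.length
    · obtain ⟨hk1, hk2⟩ := hk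
      have : (u.set r.toNat (u.getD r.toNat 0 + 1)).getD k 0
          = u.getD r.toNat 0 + 1 := by
        subst hk1
        rw [List.getD_eq_getElem?_getD, List.getElem?_set_self (by omega), Option.getD_some]
      rw [this, hk1, ih]
      have : ¬ ((r.toNat : Int) < r) := by omega
      simp
      omega
    · have hne : (u.set r.toNat (u.getD r.toNat 0 + 1)).getD k 0 = u.getD k 0 := by
        by_cases hkr : k = r.toNat
        · have hge : u.length ≤ r.toNat := by omega
          rw [List.set_eq_of_length_le hge, hkr]
        · rw [List.getD_eq_getElem?_getD, List.getElem?_set_ne (by omega),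
              ← List.getD_eq_getElem?_getD]
      rw [hne, ih]
      have h1 : ((k : Int) < r ∧ k < w.length) ↔ ((k : Int) < r + 1 ∧ k < w.length) := by
        omega
      simp only [h1]

-- the prefix-sum append loop produces the map of (S i, S (i+1))
lemma pv_loop (b : Int) (W S : Int → Int) :
    ∀ (a : Int) (acc : List (Int × Int)), a ≤ b →
      (∀ i, a ≤ i → i < b → S (i + 1) = S i + W i) →
      (PySem.List.pyRange a b 1).foldl
          (fun (st : List (Int × Int) × Int) i =>
            (st.1 ++ [(st.2, st.2 + W i)], st.2 + W i)) (acc, S a)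
        = (acc ++ (PySem.List.pyRange a b 1).map (fun i => (S i, S (i + 1))), S b) := by
  intro a
  induction hn : (b - a).toNat generalizing a with
  | zero =>
    intro acc hab _
    have : a = b := by omega
    subst this
    simp [PySem.List.pyRange_one_eq_nil (le_refl a)]
  | succ n ih =>
    intro acc hab hWS
    have hlt : a < b := by omega
    rw [PySem.List.pyRange_one_cons hlt]
    simp only [List.foldl, List.map]
    have hstep : S a + W a = S (a + 1) := (hWS a (le_refl a) hlt).symm
    rw [hstep]
    rw [ih (a + 1) (by omega) (acc ++ [(S a, S (a + 1))]) (by omega)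
        (fun i h1 h2 => hWS i (by omega) h2)]
    simp

-- ===== VERDICT (by name: the statement is the Claim_ definition above) =====
theorem balanced_tree_indexer_py_spec : Claim_equal_balanced_tree_indexer_py := by
  intro n b _ hb
  unfold Pre_balanced_tree_indexer_py at hb
  unfold Spec_balanced_tree_indexer_py balanced_tree_indexer_py balanced_tree_indexer_py_alt
  simp only []
  set f := PySem.Int.floordiv n b with hf
  set r := PySem.Int.mod n b with hrdef
  by_cases hbpos : 0 < b
  · have hr0 : 0 ≤ r := PySem.Int.mod_nonneg n hbpos
    have hrb : r < b := PySem.Int.mod_lt n hbpos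
    -- widths values
    have hw : ∀ i : Int, 0 ≤ i → i < b →
        ((PySem.List.pyRange 0 r 1).foldl
            (fun w i => w.set i.toNat (w.getD i.toNat 0 + 1))
            (List.replicate b.toNat f)).getD i.toNat 0
          = f + (if i < r then 1 else 0) := by
      intro i hi hib
      rw [pv_widths_getD r hr0]
      have hlen : (List.replicate b.toNat f).length = b.toNat := List.length_replicate
      have hget : (List.replicate b.toNat f).getD i.toNat 0 = f := by
        rw [List.getD_eq_getElem?_getD, List.getElem?_replicate]
        simp [show i.toNat < b.toNat by omega]
      rw [hget, hlen]
      have h1 : ((i.toNat : Int) < r ∧ i.toNat < b.toNat) ↔ (i < r) := by omega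
      simp only [h1]
    -- main loop
    have hS0 : (0 : Int) * f + min 0 r = 0 := by
      rw [min_eq_left hr0]; ring
    have := pv_loop b
        (fun i => ((PySem.List.pyRange 0 r 1).foldl
            (fun w i => w.set i.toNat (w.getD i.toNat 0 + 1))
            (List.replicate b.toNat f)).getD i.toNat 0)
        (fun i => i * f + min i r) 0 [] (by omega)
        (by
          intro i h1 h2
          simp only []
          rw [hw i h1 h2]
          by_cases hir : i < r
          · have h1' : min i r = i := min_eq_left (by omega)
            have h2' : min (i + 1) r = i + 1 := min_eq_left (by omega)
            simp [h1', h2', hir]; ring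
          · have h1' : min i r = r := min_eq_right (by omega)
            have h2' : min (i + 1) r = r := min_eq_right (by omega)
            simp [h1', h2', hir]; ring)
    simp only [hS0] at this
    rw [this]
    simp
  · -- b < 0: both ranges are empty
    have hbneg : b < 0 := by omega
    have hr : r ≤ 0 := (PySem.Int.mod_neg_bounds n hbneg).2
    simp [PySem.List.pyRange_one_eq_nil (by omega : b ≤ 0)]
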